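-- pv_equiv track=rewrite | github.com/lrusnac/micro-profiling | 00-common/split_customer.py | hourToGroup
-- ===== SOURCE A (Python) =====
-- time_interval_splits = sorted([6, 12, 23])
--
-- def hourToGroup(hour):
--     hour = int(hour)
--     if len(time_interval_splits) == 1:
--         return '0'
--
--     interval = 0
--     for split in time_interval_splits:
--         if hour < split:
--             return str(interval)
--         interval += 1
--
--     return '0'
-- ===== SOURCE B (Python) =====
-- import bisect
--
-- time_interval_splits = sorted([6, 12, 23])
--
-- def hourToGroup(hour):
--     hour = int(hour)
--     idx = bisect.bisect_right(time_interval_splits, hour)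
--     return str(idx % len(time_interval_splits))
-- ===== Notes on version B (the rewrite author's own statement) =====
-- stated objective: simpler
-- what changed: Replaces the early-return linear scan with a counting accumulator by a single bisect_right index into the sorted splits followed by a modulo that folds the out-of-range index back to group '0'.
import Mathlib
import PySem

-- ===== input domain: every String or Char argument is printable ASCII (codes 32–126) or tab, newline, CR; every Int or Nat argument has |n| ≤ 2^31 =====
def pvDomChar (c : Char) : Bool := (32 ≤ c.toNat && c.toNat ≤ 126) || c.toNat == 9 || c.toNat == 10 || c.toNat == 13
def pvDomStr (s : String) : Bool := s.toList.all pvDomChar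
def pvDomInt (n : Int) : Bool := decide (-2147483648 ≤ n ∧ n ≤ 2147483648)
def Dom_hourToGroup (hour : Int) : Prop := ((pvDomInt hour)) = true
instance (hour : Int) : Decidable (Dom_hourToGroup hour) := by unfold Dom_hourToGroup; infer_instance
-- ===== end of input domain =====

-- B replaces A's early-return linear scan with a bisect_right index plus modulo (simpler closed-form classification).

-- ===== PORT A =====
def timeIntervalSplits : List Int := PySem.List.sorted ([6, 12, 23] : List Int) (fun x => x)

-- the for-loop with early return: scan splits, return str(interval) at the first split with hour < split
def hourToGroupLoop (hour : Int) : List Int → Int → String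
  | [], _ => "0"
  | s :: rest, interval =>
    if hour < s then PySem.Int.toStr interval
    else hourToGroupLoop hour rest (interval + 1)

def hourToGroup (hour : Int) : String :=
  if timeIntervalSplits.length == 1 then "0"
  else hourToGroupLoop hour timeIntervalSplits 0

-- ===== PORT B =====
-- bisect_right on a sorted list = number of elements ≤ hour
def hourToGroup_alt (hour : Int) : String :=
  let idx : Nat := timeIntervalSplits.countP (fun s => s ≤ hour)
  PySem.Int.toStr (Int.ofNat (idx % timeIntervalSplits.length))

-- ===== PRECONDITION & SPEC =====
def Spec_hourToGroup (hour : Int) (out : String) : Prop := out = hourToGroup_alt hour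
instance (hour : Int) (out : String) : Decidable (Spec_hourToGroup hour out) := by unfold Spec_hourToGroup; infer_instance

-- ===== CLAIM (what is proved, stated in full; the proofs are below) =====
def Claim_equal_hourToGroup : Prop := ∀ (hour : Int), Dom_hourToGroup hour → Spec_hourToGroup hour (hourToGroup hour)

-- ===== LEMMAS AND PROOFS =====
theorem splits_eval : timeIntervalSplits = [6, 12, 23] := by decide

-- ===== VERDICT (by name: the statement is the Claim_ definition above) =====
theorem hourToGroup_spec : Claim_equal_hourToGroup := by
  intro hour _
  unfold Spec_hourToGroup hourToGroup hourToGroup_alt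
  rw [splits_eval]
  by_cases h6 : hour < 6
  · have n12 : ¬ (12 : Int) ≤ hour := by omega
    have n23 : ¬ (23 : Int) ≤ hour := by omega
    simp [hourToGroupLoop, h6, List.countP, List.countP.go, not_le.mpr h6, n12, n23]
  · by_cases h12 : hour < 12
    · have n23 : ¬ (23 : Int) ≤ hour := by omega
      simp [hourToGroupLoop, h6, h12, List.countP, List.countP.go, not_le.mpr h12,
        not_lt.mp h6, n23]
    · by_cases h23 : hour < 23
      · simp [hourToGroupLoop, h6, h12, h23, List.countP, List.countP.go, not_le.mpr h23,
          not_lt.mp h6, not_lt.mp h12]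
      · simp [hourToGroupLoop, h6, h12, h23, List.countP, List.countP.go,
          not_lt.mp h6, not_lt.mp h12, not_lt.mp h23]
        decide
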